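-- pv_equiv track=rewrite | github.com/dStern98/Advent-of-Code-2023 | advent_python/day18.py | build_dig_history
-- ===== SOURCE A (Python) =====
-- def build_dig_history(dig_instructions: list[tuple[str, int]]) -> set[tuple[int, int]]:
--     """
--     Build a set of all of the position pairs that are dug out initially.
--     """
--     current_dig_position = (0, 0)
--     dig_history: list[tuple[int, int]] = [(0, 0)]
--     for (dig_direction, dig_distance) in dig_instructions:
--         for _ in range(dig_distance):
--             (current_x, current_y) = current_dig_position
--             if dig_direction == "R":
--                 new_dig_position = (current_x, current_y + 1)
--             elif dig_direction == "D":
--                 new_dig_position = (current_x + 1, current_y)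
--             elif dig_direction == "U":
--                 new_dig_position = (current_x - 1, current_y)
--             else:
--                 new_dig_position = (current_x, current_y - 1)
--             current_dig_position = new_dig_position
--             dig_history.append(new_dig_position)
--     # We do not know the dimensions of the dig site ahead of time,
--     # so compute the min_x, min_y, and offset all pairs to never be negative.
--     min_x = min((pair[0] for pair in dig_history))
--     min_y = min((pair[1] for pair in dig_history))
--     return {(pair[0] - min_x, pair[1] - min_y) for pair in dig_history}
-- ===== SOURCE B (Python) =====
-- def build_dig_history(dig_instructions):
--     """Vertex-first rebuild: cumulative-sum the direction deltas to get the
--     polygon vertices, take the mins over the vertices only (each segment is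
--     axis-aligned and monotonic, so extremes occur at vertices), then fill
--     every segment with already-shifted cells."""
--     deltas = {"R": (0, 1), "D": (1, 0), "U": (-1, 0), "L": (0, -1)}
--     vertices = [(0, 0)]
--     x = y = 0
--     for (direction, distance) in dig_instructions:
--         (dx, dy) = deltas.get(direction, (0, -1))
--         steps = max(distance, 0)
--         x = x + dx * steps
--         y = y + dy * steps
--         vertices.append((x, y))
--     min_x = min(v[0] for v in vertices)
--     min_y = min(v[1] for v in vertices)
--     result = {(-min_x, -min_y)}
--     for ((ax, ay), (bx, by)) in zip(vertices, vertices[1:]):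
--         sx = (1 if bx > ax else 0) - (1 if bx < ax else 0)
--         sy = (1 if by > ay else 0) - (1 if by < ay else 0)
--         n = abs(bx - ax) + abs(by - ay)
--         for k in range(1, n + 1):
--             result.add((ax + sx * k - min_x, ay + sy * k - min_y))
--     return result
-- ===== Notes on version B (the rewrite author's own statement) =====
-- stated objective: alternative
-- what changed: B first cumulative-sums direction deltas into the vertex list, takes min_x/min_y over the vertices only (segments are axis-aligned and monotonic), and then emits each segment's cells already shifted into the set, instead of A's enumerate-every-cell list followed by two full min scans and a third shifting pass.
import Mathlib
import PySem

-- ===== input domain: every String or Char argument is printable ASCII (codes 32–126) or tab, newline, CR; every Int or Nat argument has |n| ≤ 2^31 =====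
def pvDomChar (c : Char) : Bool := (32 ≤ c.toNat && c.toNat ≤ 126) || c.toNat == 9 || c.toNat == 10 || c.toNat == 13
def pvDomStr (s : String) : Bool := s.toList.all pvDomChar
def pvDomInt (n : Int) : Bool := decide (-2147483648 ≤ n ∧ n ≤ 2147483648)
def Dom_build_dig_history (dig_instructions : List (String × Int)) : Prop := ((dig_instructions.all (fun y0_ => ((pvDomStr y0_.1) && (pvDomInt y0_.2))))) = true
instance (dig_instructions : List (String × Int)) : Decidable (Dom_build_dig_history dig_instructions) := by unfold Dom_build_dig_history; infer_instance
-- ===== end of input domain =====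

-- B replaces A's cell-list + two full min scans + shifting pass by a vertex-first pass:
-- min_x/min_y over the vertices only, then per-segment fill of already-shifted cells (alternative decomposition, same asymptotic cost).

-- ===== PORT A =====
def build_dig_history (dig_instructions : List (String × Int)) : List (Int × Int) :=
  let st := dig_instructions.foldl
    (fun (st : (Int × Int) × List (Int × Int)) p =>
      (PySem.List.pyRange 0 p.2 1).foldl
        (fun st _ =>
          let cx := st.1.1
          let cy := st.1.2
          let np := if p.1 = "R" then (cx, cy + 1)
            else if p.1 = "D" then (cx + 1, cy)
            else if p.1 = "U" then (cx - 1, cy)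
            else (cx, cy - 1)
          (np, st.2 ++ [np])) st)
    ((0, 0), [((0 : Int), (0 : Int))])
  let hist := st.2
  -- dig_history always contains (0,0), so min(...) never sees an empty sequence; the .getD 0 is unreachable
  let min_x := (PySem.List.min? (hist.map Prod.fst) (fun x => x)).getD 0
  let min_y := (PySem.List.min? (hist.map Prod.snd) (fun x => x)).getD 0
  PySem.Set.ofList (hist.map (fun p => (p.1 - min_x, p.2 - min_y)))

-- ===== PORT B =====
def pvDeltas : PySem.Dict String (Int × Int) :=
  PySem.Dict.ofList [("R", ((0 : Int), (1 : Int))), ("D", (1, 0)), ("U", (-1, 0)), ("L", (0, -1))]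

def build_dig_history_alt (dig_instructions : List (String × Int)) : List (Int × Int) :=
  let vst := dig_instructions.foldl
    (fun (st : (Int × Int) × List (Int × Int)) p =>
      let d := PySem.Dict.getD pvDeltas p.1 (0, -1)
      let steps := max p.2 0
      let nx := st.1.1 + d.1 * steps
      let ny := st.1.2 + d.2 * steps
      ((nx, ny), st.2 ++ [(nx, ny)])) ((0, 0), [((0 : Int), (0 : Int))])
  let vertices := vst.2
  -- vertices always contains (0,0), so min(...) never sees an empty sequence; the .getD 0 is unreachable
  let min_x := (PySem.List.min? (vertices.map Prod.fst) (fun x => x)).getD 0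
  let min_y := (PySem.List.min? (vertices.map Prod.snd) (fun x => x)).getD 0
  let init : PySem.Set (Int × Int) := PySem.Set.add PySem.Set.empty (-min_x, -min_y)
  (vertices.zip (PySem.List.slice vertices (some 1) none)).foldl
    (fun s ab =>
      let ax := ab.1.1
      let ay := ab.1.2
      let bx := ab.2.1
      let b_y := ab.2.2
      let sx := (if bx > ax then (1 : Int) else 0) - (if bx < ax then 1 else 0)
      let sy := (if b_y > ay then (1 : Int) else 0) - (if b_y < ay then 1 else 0)
      let n := |bx - ax| + |b_y - ay|
      (PySem.List.pyRange 1 (n + 1) 1).foldl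
        (fun s k => PySem.Set.add s (ax + sx * k - min_x, ay + sy * k - min_y)) s)
    init

-- ===== PRECONDITION & SPEC =====
def Spec_build_dig_history (dig_instructions : List (String × Int)) (out : List (Int × Int)) : Prop := out = build_dig_history_alt dig_instructions
instance (dig_instructions : List (String × Int)) (out : List (Int × Int)) : Decidable (Spec_build_dig_history dig_instructions out) := by unfold Spec_build_dig_history; infer_instance

-- ===== CLAIM (what is proved, stated in full; the proofs are below) =====
def Claim_equal_build_dig_history : Prop := ∀ (dig_instructions : List (String × Int)), Dom_build_dig_history dig_instructions → Spec_build_dig_history dig_instructions (build_dig_history dig_instructions)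

-- ===== LEMMAS AND PROOFS =====
def pvDelta (dir : String) : Int × Int :=
  if dir = "R" then (0, 1) else if dir = "D" then (1, 0)
  else if dir = "U" then (-1, 0) else (0, -1)
def pvSeg : Int × Int → Int × Int → Nat → List (Int × Int)
  | _, _, 0 => []
  | v, d, m + 1 => (v.1 + d.1, v.2 + d.2) :: pvSeg (v.1 + d.1, v.2 + d.2) d m

def pvStep (d : Int × Int) (st : (Int × Int) × List (Int × Int)) : (Int × Int) × List (Int × Int) :=
  ((st.1.1 + d.1, st.1.2 + d.2), st.2 ++ [(st.1.1 + d.1, st.1.2 + d.2)])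

theorem pv_innerA_clean (d : Int × Int) (l : List Int) : ∀ (v : Int × Int) (acc : List (Int × Int)),
    l.foldl (fun st _ => pvStep d st) (v, acc)
    = ((v.1 + d.1 * l.length, v.2 + d.2 * l.length), acc ++ pvSeg v d l.length) := by
  induction l with
  | nil => intro v acc; simp [pvSeg]
  | cons x xs ih =>
    intro v acc
    rw [List.foldl_cons]
    show List.foldl _ (pvStep d (v, acc)) xs = _
    rw [show pvStep d (v, acc) = ((v.1 + d.1, v.2 + d.2), acc ++ [(v.1 + d.1, v.2 + d.2)]) from rfl, ih]
    simp only [List.length_cons, pvSeg, List.append_assoc, List.singleton_append]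
    refine Prod.ext (Prod.ext ?_ ?_) rfl <;> · push_cast; ring

theorem pv_innerA (dir : String) (l : List Int) (v : Int × Int) (acc : List (Int × Int)) :
    l.foldl (fun (st : (Int × Int) × List (Int × Int)) _ =>
        let cx := st.1.1
        let cy := st.1.2
        let np := if dir = "R" then (cx, cy + 1)
          else if dir = "D" then (cx + 1, cy)
          else if dir = "U" then (cx - 1, cy)
          else (cx, cy - 1)
        (np, st.2 ++ [np])) (v, acc)
    = ((v.1 + (pvDelta dir).1 * l.length, v.2 + (pvDelta dir).2 * l.length),
        acc ++ pvSeg v (pvDelta dir) l.length) := by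
  have hfun : (fun (st : (Int × Int) × List (Int × Int)) (_ : Int) =>
        let cx := st.1.1
        let cy := st.1.2
        let np := if dir = "R" then (cx, cy + 1)
          else if dir = "D" then (cx + 1, cy)
          else if dir = "U" then (cx - 1, cy)
          else (cx, cy - 1)
        (np, st.2 ++ [np])) = (fun st _ => pvStep (pvDelta dir) st) := by
    funext st _
    unfold pvStep pvDelta
    split_ifs <;> simp [sub_eq_add_neg]
  rw [hfun, pv_innerA_clean]

def pvCells : Int × Int → List (String × Int) → List (Int × Int)
  | _, [] => []
  | v, (dir, n) :: rest =>
      pvSeg v (pvDelta dir) n.toNat ++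
        pvCells (v.1 + (pvDelta dir).1 * n.toNat, v.2 + (pvDelta dir).2 * n.toNat) rest

def pvEnd : Int × Int → List (String × Int) → Int × Int
  | v, [] => v
  | v, (dir, n) :: rest =>
      pvEnd (v.1 + (pvDelta dir).1 * n.toNat, v.2 + (pvDelta dir).2 * n.toNat) rest

theorem pv_histA (ins : List (String × Int)) : ∀ (v : Int × Int) (acc : List (Int × Int)),
    ins.foldl
      (fun (st : (Int × Int) × List (Int × Int)) p =>
        (PySem.List.pyRange 0 p.2 1).foldl
          (fun st _ =>
            let cx := st.1.1
            let cy := st.1.2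
            let np := if p.1 = "R" then (cx, cy + 1)
              else if p.1 = "D" then (cx + 1, cy)
              else if p.1 = "U" then (cx - 1, cy)
              else (cx, cy - 1)
            (np, st.2 ++ [np])) st) (v, acc)
    = (pvEnd v ins, acc ++ pvCells v ins) := by
  induction ins with
  | nil => intro v acc; simp [pvCells, pvEnd]
  | cons p rest ih =>
    obtain ⟨dir, n⟩ := p
    intro v acc
    rw [List.foldl_cons]
    show List.foldl _ ((PySem.List.pyRange 0 n 1).foldl _ (v, acc)) rest = _
    rw [pv_innerA dir, PySem.List.length_pyRange_one]
    rw [ih]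
    simp [pvCells, pvEnd]

theorem pv_deltas_getD (dir : String) : PySem.Dict.getD pvDeltas dir (0, -1) = pvDelta dir := by
  have hmk : pvDeltas = PySem.Dict.mk [("R", ((0 : Int), (1 : Int))), ("D", (1, 0)), ("U", (-1, 0)), ("L", (0, -1))] := by decide
  rw [hmk]
  by_cases h1 : dir = "R" <;> by_cases h2 : dir = "D" <;> by_cases h3 : dir = "U" <;> by_cases h4 : dir = "L"
  all_goals first
    | (subst h1; decide) | (subst h2; decide) | (subst h3; decide) | (subst h4; decide)
    | (simp [pvDelta, PySem.Dict.getD, PySem.Dict.get?, h1, h2, h3, Ne.symm h1, Ne.symm h2, Ne.symm h3, Ne.symm h4])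

def pvVerts : Int × Int → List (String × Int) → List (Int × Int)
  | _, [] => []
  | v, (dir, n) :: rest =>
      (v.1 + (pvDelta dir).1 * n.toNat, v.2 + (pvDelta dir).2 * n.toNat) ::
        pvVerts (v.1 + (pvDelta dir).1 * n.toNat, v.2 + (pvDelta dir).2 * n.toNat) rest

theorem pv_vertsB (ins : List (String × Int)) : ∀ (v : Int × Int) (acc : List (Int × Int)),
    ins.foldl
      (fun (st : (Int × Int) × List (Int × Int)) p =>
        let d := PySem.Dict.getD pvDeltas p.1 (0, -1)
        let steps := max p.2 0
        let nx := st.1.1 + d.1 * steps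
        let ny := st.1.2 + d.2 * steps
        ((nx, ny), st.2 ++ [(nx, ny)])) (v, acc)
    = (pvEnd v ins, acc ++ pvVerts v ins) := by
  induction ins with
  | nil => intro v acc; simp [pvVerts, pvEnd]
  | cons p rest ih =>
    obtain ⟨dir, n⟩ := p
    intro v acc
    rw [List.foldl_cons]
    have hmax : (max n 0) = ((n.toNat : Int)) := (Int.toNat_of_nonneg (le_max_right n 0)).symm ▸ (Int.toNat_eq_max n ▸ rfl)
    show List.foldl _
      ((v.1 + (PySem.Dict.getD pvDeltas dir (0, -1)).1 * (max n 0),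
        v.2 + (PySem.Dict.getD pvDeltas dir (0, -1)).2 * (max n 0)),
       acc ++ [(v.1 + (PySem.Dict.getD pvDeltas dir (0, -1)).1 * (max n 0),
        v.2 + (PySem.Dict.getD pvDeltas dir (0, -1)).2 * (max n 0))]) rest = _
    rw [pv_deltas_getD, hmax, ih]
    simp [pvVerts, pvEnd]

theorem pv_end_mem_seg : ∀ (m : Nat) (v d : Int × Int), 0 < m →
    (v.1 + d.1 * m, v.2 + d.2 * m) ∈ pvSeg v d m := by
  intro m
  induction m with
  | zero => intro v d h; omega
  | succ m ih =>
    intro v d _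
    rcases Nat.eq_zero_or_pos m with hm | hm
    · subst hm; simp [pvSeg]
    · have := ih (v.1 + d.1, v.2 + d.2) d hm
      simp only [pvSeg, List.mem_cons]
      right
      convert this using 2 <;> · push_cast; ring

theorem pv_verts_sub (ins : List (String × Int)) : ∀ (v : Int × Int),
    ∀ w ∈ pvVerts v ins, w = v ∨ w ∈ pvCells v ins := by
  induction ins with
  | nil => intro v w hw; simp [pvVerts] at hw
  | cons p rest ih =>
    obtain ⟨dir, n⟩ := p
    intro v w hw
    simp only [pvVerts, List.mem_cons] at hw
    set d := pvDelta dir with hd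
    set wv : Int × Int := (v.1 + d.1 * n.toNat, v.2 + d.2 * n.toNat) with hwv
    rcases hw with hw | hw
    · rcases Nat.eq_zero_or_pos n.toNat with hn | hn
      · left; rw [hw, hwv]; rw [hn]; simp
      · right
        simp only [pvCells, List.mem_append]
        left
        rw [hw]
        exact pv_end_mem_seg n.toNat v d hn
    · rcases ih wv w hw with h | h
      · rcases Nat.eq_zero_or_pos n.toNat with hn | hn
        · left; rw [h, hwv, hn]; simp
        · right; simp only [pvCells, List.mem_append]; left
          rw [h]; exact pv_end_mem_seg n.toNat v d hn
      · right; simp only [pvCells, List.mem_append]; right; exact h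

theorem pv_seg_bound1 : ∀ (m : Nat) (v d : Int × Int), -1 ≤ d.1 → d.1 ≤ 1 →
    ∀ p ∈ pvSeg v d m, v.1 ≤ p.1 ∨ v.1 + d.1 * m ≤ p.1 := by
  intro m
  induction m with
  | zero => intro v d _ _ p hp; simp [pvSeg] at hp
  | succ m ih =>
    intro v d h1 h2 p hp
    simp only [pvSeg, List.mem_cons] at hp
    have hm : (0 : Int) ≤ (m : Int) := Int.natCast_nonneg m
    rcases hp with hp | hp
    · rcases le_or_gt 0 d.1 with hd | hd
      · left; rw [hp]; omega
      · right; rw [hp]; push_cast; nlinarith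
    · rcases ih (v.1 + d.1, v.2 + d.2) d h1 h2 p hp with h | h
      · rcases le_or_gt 0 d.1 with hd | hd
        · left; omega
        · right; simp only at h; push_cast; nlinarith
      · right; simp only at h; push_cast [Nat.cast_succ] at h ⊢; nlinarith [h]

theorem pv_seg_bound2 : ∀ (m : Nat) (v d : Int × Int), -1 ≤ d.2 → d.2 ≤ 1 →
    ∀ p ∈ pvSeg v d m, v.2 ≤ p.2 ∨ v.2 + d.2 * m ≤ p.2 := by
  intro m
  induction m with
  | zero => intro v d _ _ p hp; simp [pvSeg] at hp
  | succ m ih =>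
    intro v d h1 h2 p hp
    simp only [pvSeg, List.mem_cons] at hp
    have hm : (0 : Int) ≤ (m : Int) := Int.natCast_nonneg m
    rcases hp with hp | hp
    · rcases le_or_gt 0 d.2 with hd | hd
      · left; rw [hp]; omega
      · right; rw [hp]; push_cast; nlinarith
    · rcases ih (v.1 + d.1, v.2 + d.2) d h1 h2 p hp with h | h
      · rcases le_or_gt 0 d.2 with hd | hd
        · left; omega
        · right; simp only at h; push_cast; nlinarith
      · right; simp only at h; push_cast [Nat.cast_succ] at h ⊢; nlinarith [h]

theorem pvDelta_bounds (dir : String) :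
    -1 ≤ (pvDelta dir).1 ∧ (pvDelta dir).1 ≤ 1 ∧ -1 ≤ (pvDelta dir).2 ∧ (pvDelta dir).2 ≤ 1 := by
  unfold pvDelta; split_ifs <;> norm_num

theorem pv_cells_bound (ins : List (String × Int)) : ∀ (v : Int × Int),
    ∀ p ∈ pvCells v ins,
      (∃ q, (q = v ∨ q ∈ pvVerts v ins) ∧ q.1 ≤ p.1) ∧
      (∃ q, (q = v ∨ q ∈ pvVerts v ins) ∧ q.2 ≤ p.2) := by
  induction ins with
  | nil => intro v p hp; simp [pvCells] at hp
  | cons pr rest ih =>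
    obtain ⟨dir, n⟩ := pr
    intro v p hp
    simp only [pvCells, List.mem_append] at hp
    set d := pvDelta dir with hd
    set wv : Int × Int := (v.1 + d.1 * n.toNat, v.2 + d.2 * n.toNat) with hwv
    have hmemw : wv ∈ pvVerts v ((dir, n) :: rest) := by
      simp only [pvVerts, List.mem_cons, ← hd, ← hwv]; exact Or.inl trivial
    obtain ⟨hb1, hb2, hb3, hb4⟩ := pvDelta_bounds dir
    rcases hp with hp | hp
    · constructor
      · rcases pv_seg_bound1 n.toNat v d (hd ▸ hb1) (hd ▸ hb2) p hp with h | h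
        · exact ⟨v, Or.inl rfl, h⟩
        · exact ⟨wv, Or.inr hmemw, h⟩
      · rcases pv_seg_bound2 n.toNat v d (hd ▸ hb3) (hd ▸ hb4) p hp with h | h
        · exact ⟨v, Or.inl rfl, h⟩
        · exact ⟨wv, Or.inr hmemw, h⟩
    · have hin : ∀ q, (q = wv ∨ q ∈ pvVerts wv rest) → q ∈ pvVerts v ((dir, n) :: rest) := by
        intro q hq
        rcases hq with hq | hq
        · rw [hq]; exact hmemw
        · simp only [pvVerts, List.mem_cons, ← hd, ← hwv]; right; exact hq
      obtain ⟨⟨q1, hq1, hle1⟩, ⟨q2, hq2, hle2⟩⟩ := ih wv p hp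
      exact ⟨⟨q1, Or.inr (hin q1 hq1), hle1⟩, ⟨q2, Or.inr (hin q2 hq2), hle2⟩⟩

theorem pv_min_eq (cells verts : List (Int × Int)) (f : Int × Int → Int)
    (hsub : ∀ w ∈ verts, w = ((0 : Int), (0 : Int)) ∨ w ∈ cells)
    (hbd : ∀ p ∈ cells, ∃ q, (q = ((0 : Int), (0 : Int)) ∨ q ∈ verts) ∧ f q ≤ f p) :
    (PySem.List.min? ((((0, 0) : Int × Int) :: cells).map f) (fun x => x)).getD 0
    = (PySem.List.min? ((((0, 0) : Int × Int) :: verts).map f) (fun x => x)).getD 0 := by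
  obtain ⟨m1, hm1⟩ : ∃ m1, PySem.List.min? ((((0, 0) : Int × Int) :: cells).map f) (fun x => x) = some m1 := by
    cases h : PySem.List.min? ((((0, 0) : Int × Int) :: cells).map f) (fun x => x) with
    | none => rw [PySem.List.min?_eq_none_iff] at h; simp at h
    | some m => exact ⟨m, rfl⟩
  obtain ⟨m2, hm2⟩ : ∃ m2, PySem.List.min? ((((0, 0) : Int × Int) :: verts).map f) (fun x => x) = some m2 := by
    cases h : PySem.List.min? ((((0, 0) : Int × Int) :: verts).map f) (fun x => x) with
    | none => rw [PySem.List.min?_eq_none_iff] at h; simp at h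
    | some m => exact ⟨m, rfl⟩
  rw [hm1, hm2]
  have h1mem := PySem.List.min?_mem hm1
  have h2mem := PySem.List.min?_mem hm2
  have h1min := PySem.List.min?_isMin hm1
  have h2min := PySem.List.min?_isMin hm2
  simp only [List.mem_map, List.mem_cons] at h1mem h2mem
  -- m1 ≤ m2 : m2 is f of origin or a vertex, both present among the cells-side list
  have hle1 : m1 ≤ m2 := by
    obtain ⟨w, hw, hfw⟩ := h2mem
    rcases hw with hw | hw
    · rw [← hfw, hw]; exact h1min (f ((0 : Int), (0 : Int))) (List.mem_map_of_mem (List.mem_cons_self))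
    · rcases hsub w hw with h | h
      · rw [← hfw, h]; exact h1min (f ((0 : Int), (0 : Int))) (List.mem_map_of_mem (List.mem_cons_self))
      · rw [← hfw]; exact h1min (f w) (List.mem_map_of_mem (List.mem_cons.2 (Or.inr h)))
  have hle2 : m2 ≤ m1 := by
    obtain ⟨p, hp, hfp⟩ := h1mem
    rcases hp with hp | hp
    · rw [← hfp, hp]; exact h2min (f ((0 : Int), (0 : Int))) (List.mem_map_of_mem (List.mem_cons_self))
    · obtain ⟨q, hq, hqle⟩ := hbd p hp
      have hfpm : f p = m1 := hfp
      have hm2q : m2 ≤ f q := by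
        rcases hq with hq | hq
        · rw [hq]; exact h2min (f ((0 : Int), (0 : Int))) (List.mem_map_of_mem (List.mem_cons_self))
        · exact h2min (f q) (List.mem_map_of_mem (List.mem_cons.2 (Or.inr hq)))
      rw [← hfpm]; omega
  simp only [Option.getD_some]
  omega

theorem pv_segmap_aux (d : Int × Int) (mx my : Int) : ∀ (m : Nat) (v : Int × Int),
    (List.range m).map (fun (k : Nat) => (v.1 + d.1 * (1 + (k : Int)) - mx, v.2 + d.2 * (1 + (k : Int)) - my))
    = (pvSeg v d m).map (fun p => (p.1 - mx, p.2 - my)) := by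
  intro m
  induction m with
  | zero => intro v; simp [pvSeg]
  | succ m ih =>
    intro v
    rw [List.range_succ_eq_map, List.map_cons, List.map_map]
    simp only [pvSeg, List.map_cons]
    congr 1
    · simp only [Nat.cast_zero, Prod.mk.injEq]
      constructor <;> ring
    · rw [← ih (v.1 + d.1, v.2 + d.2)]
      apply List.map_congr_left
      intro k _
      simp only [Function.comp_apply, Prod.mk.injEq]
      constructor <;> push_cast <;> ring

theorem pv_segmap (m : Nat) (v d : Int × Int) (mx my : Int) :
    (PySem.List.pyRange 1 ((m : Int) + 1) 1).map (fun k => (v.1 + d.1 * k - mx, v.2 + d.2 * k - my))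
    = (pvSeg v d m).map (fun p => (p.1 - mx, p.2 - my)) := by
  rw [PySem.List.pyRange_one]
  have h : ((m : Int) + 1 - 1).toNat = m := by omega
  rw [h, List.map_map, ← pv_segmap_aux d mx my m v]
  apply List.map_congr_left
  intro k _
  simp only [Function.comp_apply]

theorem pv_bridge (d : Int × Int) (hd : |d.1| + |d.2| = 1) (s : Nat) (v : Int × Int) (mx my : Int) :
    (PySem.List.pyRange 1 ((|v.1 + d.1 * s - v.1| + |v.2 + d.2 * s - v.2|) + 1) 1).map
      (fun k => (v.1 + ((if v.1 + d.1 * s > v.1 then (1 : Int) else 0) - (if v.1 + d.1 * s < v.1 then 1 else 0)) * k - mx,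
                 v.2 + ((if v.2 + d.2 * s > v.2 then (1 : Int) else 0) - (if v.2 + d.2 * s < v.2 then 1 else 0)) * k - my))
    = (pvSeg v d s).map (fun p => (p.1 - mx, p.2 - my)) := by
  have hd1 : d.1 = -1 ∨ d.1 = 0 ∨ d.1 = 1 := by
    have h1 : |d.1| ≤ 1 := by have := abs_nonneg d.2; omega
    have := abs_nonneg d.1
    rcases abs_cases d.1 with ⟨h, _⟩ | ⟨h, _⟩ <;> omega
  have hd2 : d.2 = -1 ∨ d.2 = 0 ∨ d.2 = 1 := by
    have h1 : |d.2| ≤ 1 := by have := abs_nonneg d.1; omega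
    rcases abs_cases d.2 with ⟨h, _⟩ | ⟨h, _⟩ <;> omega
  rcases Nat.eq_zero_or_pos s with hs | hs
  · subst hs
    simp only [Nat.cast_zero, mul_zero, add_zero, sub_self, abs_zero, zero_add, pvSeg, List.map_nil]
    rw [PySem.List.pyRange_one]
    simp
  · have hS : (0 : Int) < (s : Int) := by exact_mod_cast hs
    have hsx : ((if v.1 + d.1 * s > v.1 then (1 : Int) else 0) - (if v.1 + d.1 * s < v.1 then 1 else 0)) = d.1 := by
      rcases hd1 with h | h | h <;> rw [h] <;> split_ifs <;> nlinarith
    have hsy : ((if v.2 + d.2 * s > v.2 then (1 : Int) else 0) - (if v.2 + d.2 * s < v.2 then 1 else 0)) = d.2 := by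
      rcases hd2 with h | h | h <;> rw [h] <;> split_ifs <;> nlinarith
    have hn : |v.1 + d.1 * s - v.1| + |v.2 + d.2 * s - v.2| = (s : Int) := by
      have e1 : v.1 + d.1 * s - v.1 = d.1 * s := by ring
      have e2 : v.2 + d.2 * s - v.2 = d.2 * s := by ring
      rw [e1, e2, abs_mul, abs_mul, abs_of_nonneg (le_of_lt hS), ← add_mul, hd, one_mul]
    rw [hsx, hsy, hn, pv_segmap s v d mx my]

theorem pvDelta_abs (dir : String) : |(pvDelta dir).1| + |(pvDelta dir).2| = 1 := by
  unfold pvDelta; split_ifs <;> norm_num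

theorem pv_fillB (mx my : Int) (ins : List (String × Int)) : ∀ (v : Int × Int) (s : PySem.Set (Int × Int)),
    ((v :: pvVerts v ins).zip (pvVerts v ins)).foldl
      (fun s ab =>
        let ax := ab.1.1
        let ay := ab.1.2
        let bx := ab.2.1
        let b_y := ab.2.2
        let sx := (if bx > ax then (1 : Int) else 0) - (if bx < ax then 1 else 0)
        let sy := (if b_y > ay then (1 : Int) else 0) - (if b_y < ay then 1 else 0)
        let n := |bx - ax| + |b_y - ay|
        (PySem.List.pyRange 1 (n + 1) 1).foldl
          (fun s k => PySem.Set.add s (ax + sx * k - mx, ay + sy * k - my)) s) s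
    = ((pvCells v ins).map (fun p => (p.1 - mx, p.2 - my))).foldl PySem.Set.add s := by
  induction ins with
  | nil => intro v s; simp [pvVerts, pvCells]
  | cons pr rest ih =>
    obtain ⟨dir, n⟩ := pr
    intro v s
    simp only [pvVerts, pvCells, List.zip_cons_cons, List.foldl_cons, List.map_append, List.foldl_append]
    set d := pvDelta dir with hd
    set w : Int × Int := (v.1 + d.1 * n.toNat, v.2 + d.2 * n.toNat) with hw
    show ((w :: pvVerts w rest).zip (pvVerts w rest)).foldl _
        ((PySem.List.pyRange 1 ((|w.1 - v.1| + |w.2 - v.2|) + 1) 1).foldl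
          (fun s k => PySem.Set.add s
            (v.1 + ((if w.1 > v.1 then (1 : Int) else 0) - (if w.1 < v.1 then 1 else 0)) * k - mx,
             v.2 + ((if w.2 > v.2 then (1 : Int) else 0) - (if w.2 < v.2 then 1 else 0)) * k - my)) s) = _
    have hinner : (PySem.List.pyRange 1 ((|w.1 - v.1| + |w.2 - v.2|) + 1) 1).foldl
          (fun s k => PySem.Set.add s
            (v.1 + ((if w.1 > v.1 then (1 : Int) else 0) - (if w.1 < v.1 then 1 else 0)) * k - mx,
             v.2 + ((if w.2 > v.2 then (1 : Int) else 0) - (if w.2 < v.2 then 1 else 0)) * k - my)) s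
        = ((pvSeg v d n.toNat).map (fun p => (p.1 - mx, p.2 - my))).foldl PySem.Set.add s := by
      rw [← PySem.Set.update_map_eq_foldl_add]
      rw [hw]
      simp only
      rw [pv_bridge d (pvDelta_abs dir ▸ hd ▸ rfl) n.toNat v mx my]
      rfl
    rw [hinner, ih w]

-- ===== VERDICT (by name: the statement is the Claim_ definition above) =====
theorem build_dig_history_spec : Claim_equal_build_dig_history := by
  intro ins _
  unfold Spec_build_dig_history build_dig_history build_dig_history_alt
  simp only []
  rw [pv_histA ins ((0 : Int), (0 : Int)) [((0 : Int), (0 : Int))],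
      pv_vertsB ins ((0 : Int), (0 : Int)) [((0 : Int), (0 : Int))]]
  simp only [List.singleton_append]
  rw [pv_min_eq (pvCells (0, 0) ins) (pvVerts (0, 0) ins) Prod.fst
        (pv_verts_sub ins (0, 0))
        (fun p hp => (pv_cells_bound ins (0, 0) p hp).1),
      pv_min_eq (pvCells (0, 0) ins) (pvVerts (0, 0) ins) Prod.snd
        (pv_verts_sub ins (0, 0))
        (fun p hp => (pv_cells_bound ins (0, 0) p hp).2)]
  set mx := (PySem.List.min? ((((0, 0) : Int × Int) :: pvVerts (0, 0) ins).map Prod.fst) (fun x => x)).getD 0 with hmx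
  set my := (PySem.List.min? ((((0, 0) : Int × Int) :: pvVerts (0, 0) ins).map Prod.snd) (fun x => x)).getD 0 with hmy
  rw [PySem.List.slice_from_one, List.tail_cons, pv_fillB mx my ins ((0 : Int), (0 : Int))]
  rw [PySem.Set.ofList_eq_foldl, List.map_cons, List.foldl_cons]
  have h0 : ((((0 : Int), (0 : Int)) : Int × Int).1 - mx, (((0 : Int), (0 : Int)) : Int × Int).2 - my) = ((-mx, -my) : Int × Int) := by
    simp
  rw [h0]
  rfl
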